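-- pv_equiv track=rewrite | github.com/geodimitrov/Python-Fundamentals-SoftUni | Lists/Advanced/More Exercises/03. take-skip_rope.py | sep_digits_from_non_digits
-- ===== SOURCE A (Python) =====
-- def sep_digits_from_non_digits(string):
--     nums = []
--     non_nums = []
--
--     for char in string:
--         if char.isdigit():
--             nums.append(char)
--         else:
--             non_nums.append(char)
--
--     return nums, "".join(non_nums)
-- ===== SOURCE B (Python) =====
-- def sep_digits_from_non_digits(string):
--     nums = [c for c in string if c.isdigit()]
--     non_nums = "".join(c for c in string if not c.isdigit())
--     return nums, non_nums
-- ===== Notes on version B (the rewrite author's own statement) =====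
-- stated objective: idiomatic
-- what changed: Replaced the single accumulating loop with two branches by two independent filtered comprehensions over the string (one pass per output component).
import Mathlib
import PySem

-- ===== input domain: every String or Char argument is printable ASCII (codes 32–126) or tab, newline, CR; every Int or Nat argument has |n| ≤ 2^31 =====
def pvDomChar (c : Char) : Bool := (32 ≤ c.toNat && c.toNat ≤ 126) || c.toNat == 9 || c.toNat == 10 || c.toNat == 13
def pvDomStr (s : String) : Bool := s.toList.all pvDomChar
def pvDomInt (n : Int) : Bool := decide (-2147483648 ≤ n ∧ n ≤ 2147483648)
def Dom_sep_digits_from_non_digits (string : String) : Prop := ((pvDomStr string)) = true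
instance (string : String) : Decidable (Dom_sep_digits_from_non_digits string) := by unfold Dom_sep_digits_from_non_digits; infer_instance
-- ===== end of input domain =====

-- B replaces A's single two-branch accumulating loop with two independent filters (idiomatic decomposition, same cost).

-- ===== PORT A =====
-- one loop, appending each char to nums or non_nums; nums is a list of 1-char strings, non_nums joined at the end
def sep_digits_from_non_digits (string : String) : List String × String :=
  let acc := string.toList.foldl
    (fun (st : List String × List Char) c =>
      if PySem.Chars.isdigit c then (st.1 ++ [String.mk [c]], st.2)
      else (st.1, st.2 ++ [c]))
    ([], [])
  (acc.1, String.mk acc.2)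

-- ===== PORT B =====
-- two independent filtered comprehensions over the same string
def sep_digits_from_non_digits_alt (string : String) : List String × String :=
  ((string.toList.filter (fun c => PySem.Chars.isdigit c)).map (fun c => String.mk [c]),
   String.mk (string.toList.filter (fun c => !PySem.Chars.isdigit c)))

-- ===== PRECONDITION & SPEC =====
def Spec_sep_digits_from_non_digits (string : String) (out : List String × String) : Prop := out = sep_digits_from_non_digits_alt string
instance (string : String) (out : List String × String) : Decidable (Spec_sep_digits_from_non_digits string out) := by unfold Spec_sep_digits_from_non_digits; infer_instance

-- ===== CLAIM (what is proved, stated in full; the proofs are below) =====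
def Claim_equal_sep_digits_from_non_digits : Prop := ∀ (string : String), Dom_sep_digits_from_non_digits string → Spec_sep_digits_from_non_digits string (sep_digits_from_non_digits string)

-- ===== LEMMAS AND PROOFS =====

theorem sep_foldl_inv (l : List Char) (ns : List String) (nn : List Char) :
    l.foldl
      (fun (st : List String × List Char) c =>
        if PySem.Chars.isdigit c then (st.1 ++ [String.mk [c]], st.2)
        else (st.1, st.2 ++ [c]))
      (ns, nn)
    = (ns ++ (l.filter (fun c => PySem.Chars.isdigit c)).map (fun c => String.mk [c]),
       nn ++ l.filter (fun c => !PySem.Chars.isdigit c)) := by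
  induction l generalizing ns nn with
  | nil => simp
  | cons c l ih =>
    by_cases h : PySem.Chars.isdigit c = true <;>
      simp [List.foldl_cons, h, ih]

-- ===== VERDICT (by name: the statement is the Claim_ definition above) =====
theorem sep_digits_from_non_digits_spec : Claim_equal_sep_digits_from_non_digits := by
  intro s _
  show _ = _
  simp [sep_digits_from_non_digits, sep_digits_from_non_digits_alt, sep_foldl_inv]
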